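-- pv_equiv track=rewrite | github.com/DanielaMenchaca/Dani | L02/L02.py | nuevo_muro
-- ===== SOURCE A (Python) =====
-- def nuevo_muro(muro):
--     desde = 0
--     hasta= 0
--     desde_ = 0
--     subiendo = True
--     for i in range(len(muro)-1):
--         if subiendo:
--             if muro[i]>muro[i+1]:
--                 subiendo = False
--             if muro[i]==muro[i+1]:
--                 if hasta-desde < i - desde_:
--                     desde=desde_
--                     hasta=i
--                 desde_= i+1
--         else:
--             if muro[i] <= muro[i+1]:
--                 subiendo=True
--                 if hasta-desde < i - desde_:
--                     desde=desde_
--                     hasta=i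
--                 if muro[i]<muro[i+1]:
--                     desde_=i
--                 if muro[i]==muro[i+1]:
--                     desde_=i+1
--     if hasta-desde < (len(muro)-1) - desde_:
--         desde=desde_
--         hasta=len(muro)-1
--     return (muro[desde:hasta + 1])
-- ===== SOURCE B (Python) =====
-- def nuevo_muro(muro):
--     n = len(muro)
--     # Stateless cut detection: a segment boundary between i and i+1 is a purely
--     # local fact -- a plateau (muro[i]==muro[i+1], next segment starts at i+1)
--     # or a strict valley (muro[i-1]>muro[i]<muro[i+1], next segment starts at i,
--     # sharing the valley point).  No 'subiendo' state machine is needed.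
--     cuts = [(i, i + 1) if muro[i] == muro[i + 1] else (i, i)
--             for i in range(n - 1)
--             if muro[i] == muro[i + 1]
--             or (i > 0 and muro[i - 1] > muro[i] and muro[i] < muro[i + 1])]
--     starts = [0] + [nxt for _, nxt in cuts]
--     ends = [end for end, _ in cuts] + [n - 1]
--     s, e = max(zip(starts, ends), key=lambda p: p[1] - p[0])
--     return muro[s:e + 1]
-- ===== Notes on version B (the rewrite author's own statement) =====
-- stated objective: alternative
-- what changed: A detects segment boundaries with a stateful scan carrying a 'subiendo' flag and updates the best slice inline; B has no state machine at all: it marks every cut position by a purely local three-point predicate (plateau muro[i]==muro[i+1], or strict valley muro[i-1]>muro[i]<muro[i+1]) in one comprehension, stitches starts and ends together with zip, and lets Python max pick the first longest span.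
import Mathlib
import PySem

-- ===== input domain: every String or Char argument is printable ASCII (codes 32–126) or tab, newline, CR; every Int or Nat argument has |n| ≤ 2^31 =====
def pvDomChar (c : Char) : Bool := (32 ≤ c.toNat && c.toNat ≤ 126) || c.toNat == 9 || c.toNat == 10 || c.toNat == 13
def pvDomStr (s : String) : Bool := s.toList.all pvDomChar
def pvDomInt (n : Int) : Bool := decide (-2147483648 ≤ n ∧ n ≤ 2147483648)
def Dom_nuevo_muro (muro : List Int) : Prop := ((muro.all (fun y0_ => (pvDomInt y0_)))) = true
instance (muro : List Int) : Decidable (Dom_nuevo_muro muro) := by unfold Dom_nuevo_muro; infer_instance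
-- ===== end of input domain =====

-- B replaces A's stateful 'subiendo' scan by a stateless pass: segment boundaries are
-- detected by purely local 3-point predicates (plateau / strict valley), the spans are
-- assembled by zipping starts with ends, and Python max picks the slice; objective: alternative.

-- ===== PORT A =====
-- loop body of A, on state ((desde, hasta), desde_, subiendo); loop indices stay in range, so pyGetD is exact
def pvStepA (muro : List Int) (st : (Int × Int) × Int × Bool) (i : Int) : (Int × Int) × Int × Bool :=
  let ((desde, hasta), desde_, subiendo) := st
  if subiendo then
    let subiendo := if PySem.List.pyGetD muro i 0 > PySem.List.pyGetD muro (i+1) 0 then false else subiendo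
    if PySem.List.pyGetD muro i 0 = PySem.List.pyGetD muro (i+1) 0 then
      let dh := if hasta - desde < i - desde_ then (desde_, i) else (desde, hasta)
      (dh, i + 1, subiendo)
    else ((desde, hasta), desde_, subiendo)
  else
    if PySem.List.pyGetD muro i 0 ≤ PySem.List.pyGetD muro (i+1) 0 then
      let dh := if hasta - desde < i - desde_ then (desde_, i) else (desde, hasta)
      let desde_ := if PySem.List.pyGetD muro i 0 < PySem.List.pyGetD muro (i+1) 0 then i else desde_
      let desde_ := if PySem.List.pyGetD muro i 0 = PySem.List.pyGetD muro (i+1) 0 then i + 1 else desde_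
      (dh, desde_, true)
    else ((desde, hasta), desde_, subiendo)

def nuevo_muro (muro : List Int) : List Int :=
  let n : Int := muro.length
  let st := (PySem.List.pyRange 0 (n - 1) 1).foldl (pvStepA muro) ((0, 0), 0, true)
  let ((desde, hasta), desde_, _) := st
  let dh := if hasta - desde < (n - 1) - desde_ then (desde_, n - 1) else (desde, hasta)
  PySem.List.slice muro (some dh.1) (some (dh.2 + 1))

-- ===== PORT B =====
-- B's comprehension body: the purely local cut test at position i
-- (plateau → close at i, next segment at i+1; strict valley → close at i, next segment at i)
def pvCutAt (muro : List Int) (i : Int) : Option (Int × Int) :=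
  if PySem.List.pyGetD muro i 0 = PySem.List.pyGetD muro (i+1) 0 then some (i, i + 1)
  else if 0 < i ∧ PySem.List.pyGetD muro (i-1) 0 > PySem.List.pyGetD muro i 0
          ∧ PySem.List.pyGetD muro i 0 < PySem.List.pyGetD muro (i+1) 0 then some (i, i)
  else none

def nuevo_muro_alt (muro : List Int) : List Int :=
  let n : Int := muro.length
  let cuts := (PySem.List.pyRange 0 (n - 1) 1).filterMap (pvCutAt muro)
  let starts := 0 :: cuts.map (·.2)
  let ends := cuts.map (·.1) ++ [n - 1]
  let best := PySem.List.maxD (starts.zip ends) (fun p => p.2 - p.1) (0, 0)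
  PySem.List.slice muro (some best.1) (some (best.2 + 1))

-- ===== PRECONDITION & SPEC =====
def Spec_nuevo_muro (muro : List Int) (out : List Int) : Prop := out = nuevo_muro_alt muro
instance (muro : List Int) (out : List Int) : Decidable (Spec_nuevo_muro muro out) := by unfold Spec_nuevo_muro; infer_instance

-- ===== CLAIM (what is proved, stated in full; the proofs are below) =====
def Claim_equal_nuevo_muro : Prop := ∀ (muro : List Int), Dom_nuevo_muro muro → Spec_nuevo_muro muro (nuevo_muro muro)

-- ===== LEMMAS AND PROOFS =====

-- proof-side abbreviations for B's data
def pvCuts (muro : List Int) (m : Int) : List (Int × Int) :=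
  (PySem.List.pyRange 0 m 1).filterMap (pvCutAt muro)

-- stitch the cut list into the CLOSED spans (start of each = previous cut's restart)
def pvStitch (s : Int) : List (Int × Int) → List (Int × Int)
  | [] => []
  | (e, nx) :: cs => (s, e) :: pvStitch nx cs

-- the start of the still-open segment after the cuts
def pvLastStart (s : Int) : List (Int × Int) → Int
  | [] => s
  | (_, nx) :: cs => pvLastStart nx cs

-- A's best-update (strict improvement, first wins)
def pvBStep (b c : Int × Int) : Int × Int := if b.2 - b.1 < c.2 - c.1 then c else b

-- A's subiendo flag after processing indices 0..k-1
def pvSub (muro : List Int) (k : Nat) : Bool :=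
  if k = 0 then true
  else decide (PySem.List.pyGetD muro ((k : Int) - 1) 0 ≤ PySem.List.pyGetD muro (k : Int) 0)

theorem pvStitch_append (c : Int × Int) :
    ∀ (cs : List (Int × Int)) (s : Int),
      pvStitch s (cs ++ [c]) = pvStitch s cs ++ [(pvLastStart s cs, c.1)] := by
  intro cs
  induction cs with
  | nil => intro s; simp [pvStitch, pvLastStart]
  | cons hd tl ih =>
    intro s; obtain ⟨e, nx⟩ := hd
    simp [pvStitch, pvLastStart, ih]

theorem pvLastStart_append (c : Int × Int) :
    ∀ (cs : List (Int × Int)) (s : Int), pvLastStart s (cs ++ [c]) = c.2 := by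
  intro cs
  induction cs with
  | nil => intro s; simp [pvLastStart]
  | cons hd tl ih =>
    intro s; obtain ⟨e, nx⟩ := hd
    simp [pvLastStart, ih]

theorem pvCuts_succ (muro : List Int) (k : Nat) :
    pvCuts muro ((k : Int) + 1) = pvCuts muro k ++ (pvCutAt muro k).toList := by
  unfold pvCuts
  rw [PySem.List.pyRange_one_succ_right (by exact_mod_cast Int.natCast_nonneg k),
      List.filterMap_append]
  cases h : pvCutAt muro (k : Int) <;> simp [h]

-- B's spans (starts zipped with ends) are the stitched cut list plus the trailing span
theorem pvZip_eq_stitch (last : Int) :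
    ∀ (cs : List (Int × Int)) (s : Int),
      (s :: cs.map (·.2)).zip (cs.map (·.1) ++ [last]) =
        pvStitch s cs ++ [(pvLastStart s cs, last)] := by
  intro cs
  induction cs with
  | nil => intro s; simp [pvStitch, pvLastStart]
  | cons hd tl ih =>
    intro s; obtain ⟨e, nx⟩ := hd
    simp only [List.map_cons, List.cons_append, List.zip_cons_cons, pvStitch, pvLastStart]
    rw [ih nx]

-- Python max (first maximal) over a nonempty span list whose head is (0, e), 0 ≤ e,
-- is A's strict-improvement fold started at (0, 0)
theorem pvMax?_cons (t : List (Int × Int)) (h : Int × Int) :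
    PySem.List.max? (h :: t) (fun p => p.2 - p.1) = some (t.foldl pvBStep h) := by
  unfold PySem.List.max?
  rw [List.foldl_cons]
  show List.foldl _ (some h) t = _
  induction t generalizing h with
  | nil => rfl
  | cons c tl ih =>
    rw [List.foldl_cons, List.foldl_cons]
    show List.foldl _ (if h.2 - h.1 < c.2 - c.1 then some c else some h) tl = _
    unfold pvBStep
    split_ifs <;> exact ih _

theorem pvMaxD_eq_foldl (t : List (Int × Int)) (e : Int) (he : 0 ≤ e) :
    PySem.List.maxD ((0, e) :: t) (fun p => p.2 - p.1) (0, 0) =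
      List.foldl pvBStep (0, 0) ((0, e) :: t) := by
  have h0 : pvBStep (0, 0) (0, e) = (0, e) := by
    unfold pvBStep
    rcases lt_or_eq_of_le he with h | h
    · simp [h]
    · simp [← h]
  unfold PySem.List.maxD
  rw [pvMax?_cons, Option.getD_some, List.foldl_cons, h0]

-- every cut closes at its own (nonnegative) index
theorem pvCuts_fst_nonneg (muro : List Int) (m : Int) :
    ∀ c ∈ pvCuts muro m, 0 ≤ c.1 := by
  intro c hc
  unfold pvCuts at hc
  obtain ⟨i, hi, hci⟩ := List.mem_filterMap.mp hc
  have hi0 : 0 ≤ i := (PySem.List.mem_pyRange_one.mp hi).1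
  unfold pvCutAt at hci
  split_ifs at hci <;> (cases hci; simpa)

-- THE LOOP INVARIANT: A's fold state after indices 0..k-1 is determined by B's cut list
theorem pvInv (muro : List Int) (k : Nat) (hk : (k : Int) ≤ (muro.length : Int) - 1) :
    (PySem.List.pyRange 0 (k : Int) 1).foldl (pvStepA muro) ((0, 0), 0, true) =
      ((pvStitch 0 (pvCuts muro k)).foldl pvBStep (0, 0),
       pvLastStart 0 (pvCuts muro k),
       pvSub muro k) := by
  induction k with
  | zero => simp [PySem.List.pyRange_one_eq_nil, pvCuts, pvStitch, pvLastStart, pvSub]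
  | succ k ih =>
    have hk' : (k : Int) ≤ (muro.length : Int) - 1 := by push_cast at hk ⊢; omega
    have hcast : ((k + 1 : Nat) : Int) = (k : Int) + 1 := by push_cast; ring
    rw [hcast, PySem.List.pyRange_one_succ_right (by exact_mod_cast Int.natCast_nonneg k),
        List.foldl_append, ih hk', pvCuts_succ]
    simp only [List.foldl_cons, List.foldl_nil]
    unfold pvStepA
    set a := PySem.List.pyGetD muro (k : Int) 0 with ha
    set b := PySem.List.pyGetD muro ((k : Int) + 1) 0 with hb
    have hsub1 : pvSub muro (k + 1) = decide (a ≤ b) := by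
      unfold pvSub
      rw [if_neg (Nat.succ_ne_zero k),
          show ((k + 1 : Nat) : Int) - 1 = (k : Int) by push_cast; ring,
          show ((k + 1 : Nat) : Int) = (k : Int) + 1 by push_cast; ring, ← ha, ← hb]
    by_cases heq : a = b
    · -- plateau: close at k, restart at k+1, subiendo := true
      have hcut : pvCutAt muro k = some ((k : Int), (k : Int) + 1) := by
        simp only [pvCutAt, ← ha, ← hb]
        simp [heq]
      rw [hcut]
      simp only [Option.toList_some, pvStitch_append, pvLastStart_append, List.foldl_append]
      cases hsf : pvSub muro k with
      | true => simp [heq, hsub1, pvBStep]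
      | false => simp [heq, hsub1, pvBStep]
    · by_cases hval : 0 < (k : Int) ∧ PySem.List.pyGetD muro ((k : Int) - 1) 0 > a ∧ a < b
      · -- strict valley: close at k, restart at k (shared point), subiendo := true
        have hcut : pvCutAt muro k = some ((k : Int), (k : Int)) := by
          have h1 := hval.1
          simp only [pvCutAt, ← ha, ← hb]
          simp [heq, hval]
          omega
        have hsf : pvSub muro k = false := by
          unfold pvSub
          have hk0 : k ≠ 0 := by
            intro h
            have h1 := hval.1
            rw [h] at h1
            exact absurd h1 (by norm_num)
          simp [hk0, ← ha]
          omega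
        rw [hcut, hsf]
        simp only [Option.toList_some, pvStitch_append, pvLastStart_append, List.foldl_append]
        simp [le_of_lt hval.2.2, hval.2.2, heq, pvBStep, hsub1]
      · -- no cut at k: the state's best and start are unchanged
        have hcut : pvCutAt muro k = none := by
          simp only [pvCutAt, ← ha, ← hb]
          simp [heq]
          intro hk0 hpa
          have h2 : ¬ a < b := fun hab => hval ⟨by exact_mod_cast hk0, hpa, hab⟩
          omega
        rw [hcut]
        simp only [Option.toList_none, List.append_nil]
        cases hsf : pvSub muro k with
        | true =>
          simp [heq, hsub1]
          by_cases hab : b < a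
          · simp [hab] <;> omega
          · simp [hab] <;> omega
        | false =>
          -- subiendo is false, so muro[k-1] > muro[k]; no valley and a ≠ b force a > b
          have hk0 : k ≠ 0 := by
            intro h
            rw [h] at hsf; unfold pvSub at hsf; simp at hsf
          have hprev : PySem.List.pyGetD muro ((k : Int) - 1) 0 > a := by
            unfold pvSub at hsf
            simp [hk0, ← ha] at hsf
            omega
          have hab : ¬ a ≤ b := by
            intro hle
            rcases lt_or_eq_of_le hle with h | h
            · exact hval ⟨by exact_mod_cast Nat.pos_of_ne_zero hk0, hprev, h⟩
            · exact heq h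
          simp [hab, hsub1]

-- ===== VERDICT (by name: the statement is the Claim_ definition above) =====
theorem nuevo_muro_spec : Claim_equal_nuevo_muro := by
  intro muro _
  show nuevo_muro muro = nuevo_muro_alt muro
  rcases List.eq_nil_or_concat muro with hnil | ⟨_, _, hne⟩
  · subst hnil; decide
  · have hlen : 1 ≤ muro.length := by subst hne; simp
    obtain ⟨k, hk⟩ : ∃ k : Nat, muro.length = k + 1 := ⟨muro.length - 1, by omega⟩
    have hn1 : (muro.length : Int) - 1 = (k : Int) := by rw [hk]; push_cast; ring
    unfold nuevo_muro nuevo_muro_alt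
    simp only [hn1]
    rw [pvInv muro k (by omega), pvZip_eq_stitch,
        show List.filterMap (pvCutAt muro) (PySem.List.pyRange 0 (k : Int) 1) =
          pvCuts muro k from rfl]
    cases hcs : pvCuts muro (k : Int) with
    | nil =>
      simp only [pvStitch, pvLastStart, List.nil_append]
      rw [pvMaxD_eq_foldl [] (k : Int) (Int.natCast_nonneg k)]
      simp only [List.foldl_cons, List.foldl_nil]
      unfold pvBStep
      split_ifs <;> rfl
    | cons hd tl =>
      obtain ⟨e, nx⟩ := hd
      have he : (0 : Int) ≤ e := by
        have := pvCuts_fst_nonneg muro k (e, nx) (by rw [hcs]; exact List.mem_cons_self ..)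
        simpa using this
      simp only [pvStitch, pvLastStart, List.cons_append]
      rw [pvMaxD_eq_foldl _ e he,
          show ((0 : Int), e) :: (pvStitch nx tl ++ [(pvLastStart nx tl, (k : Int))]) =
            (((0 : Int), e) :: pvStitch nx tl) ++ [(pvLastStart nx tl, (k : Int))] from by simp,
          List.foldl_append]
      simp only [List.foldl_cons, List.foldl_nil]
      -- A's final strict-improvement step is exactly one more pvBStep
      unfold pvBStep
      split_ifs <;> rfl
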